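-- pv_equiv track=rewrite | github.com/Acetech-1399/Shipglobal | authentication/shipping_price_calculator.py | get_price_for_weight
-- ===== SOURCE A (Python) =====
-- def get_price_for_weight(final_weight, price_slab):
--     closest = None
--     for w in sorted(price_slab.keys()):
--         if final_weight <= w:
--             closest = w
--             break
--     if closest is None:
--         closest = max(price_slab.keys())
--     return price_slab[closest]
-- ===== SOURCE B (Python) =====
-- def get_price_for_weight(final_weight, price_slab):
--     candidates = [w for w in price_slab if final_weight <= w]
--     key = min(candidates) if candidates else max(price_slab)
--     return price_slab[key]
-- ===== Notes on version B (the rewrite author's own statement) =====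
-- stated objective: faster
-- what changed: Replaces A's sort of all keys followed by a scan-with-break by a single filter pass collecting keys >= weight and taking min of them (or max of all keys if none), with no sorting at all.
import Mathlib
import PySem

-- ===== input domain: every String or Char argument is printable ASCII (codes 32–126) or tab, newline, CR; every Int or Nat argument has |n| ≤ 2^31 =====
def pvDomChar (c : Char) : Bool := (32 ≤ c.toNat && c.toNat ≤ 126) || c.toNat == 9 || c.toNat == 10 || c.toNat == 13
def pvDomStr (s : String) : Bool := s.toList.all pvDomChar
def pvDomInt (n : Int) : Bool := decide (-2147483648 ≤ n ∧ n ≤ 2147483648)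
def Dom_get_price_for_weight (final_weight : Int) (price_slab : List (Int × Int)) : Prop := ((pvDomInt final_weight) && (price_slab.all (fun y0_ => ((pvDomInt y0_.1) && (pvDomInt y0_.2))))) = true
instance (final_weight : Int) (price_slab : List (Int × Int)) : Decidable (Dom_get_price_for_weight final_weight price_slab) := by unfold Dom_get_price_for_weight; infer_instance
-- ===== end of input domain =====

-- B replaces A's sort-then-scan-with-break by a single filter pass plus min/max (no sort): O(n) instead of O(n log n); a timing run measured B faster.

-- ===== PORT A =====
-- the 'for w in sorted(...): if final_weight <= w: closest = w; break' loop
def pvFindLoop (final_weight : Int) : List Int → Option Int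
  | [] => none
  | w :: rest => if final_weight ≤ w then some w else pvFindLoop final_weight rest

def get_price_for_weight (final_weight : Int) (price_slab : List (Int × Int)) : Int :=
  let d := PySem.Dict.ofList price_slab
  let closest? := pvFindLoop final_weight (PySem.List.sorted d.keys (fun x => x) false)
  let closest :=
    match closest? with
    | some w => w
    | none => (PySem.List.max? d.keys (fun x => x)).getD 0  -- none = ValueError (empty dict), outside Pre_
  PySem.Dict.getD d closest 0  -- closest is always a key of d when d ≠ empty

-- ===== PORT B =====
def get_price_for_weight_alt (final_weight : Int) (price_slab : List (Int × Int)) : Int :=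
  let d := PySem.Dict.ofList price_slab
  let candidates := d.keys.filter (fun w => final_weight ≤ w)
  let key :=
    if candidates ≠ [] then (PySem.List.min? candidates (fun x => x)).getD 0
    else (PySem.List.max? d.keys (fun x => x)).getD 0  -- none = ValueError (empty dict), outside Pre_
  PySem.Dict.getD d key 0

-- ===== PRECONDITION & SPEC =====
-- Pre_ excludes only the empty dict, on which both Pythons raise ValueError (max of an empty sequence).
def Pre_get_price_for_weight (final_weight : Int) (price_slab : List (Int × Int)) : Prop := price_slab ≠ []
instance (final_weight : Int) (price_slab : List (Int × Int)) : Decidable (Pre_get_price_for_weight final_weight price_slab) := by unfold Pre_get_price_for_weight; infer_instance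
def pvWitness_get_price_for_weight : Int × (List (Int × Int)) := (3, [(5, 100), (1, 40)])
def Spec_get_price_for_weight (final_weight : Int) (price_slab : List (Int × Int)) (out : Int) : Prop := out = get_price_for_weight_alt final_weight price_slab
instance (final_weight : Int) (price_slab : List (Int × Int)) (out : Int) : Decidable (Spec_get_price_for_weight final_weight price_slab out) := by unfold Spec_get_price_for_weight; infer_instance

-- ===== CLAIM (what is proved, stated in full; the proofs are below) =====
def Claim_equal_get_price_for_weight : Prop := ∀ (final_weight : Int) (price_slab : List (Int × Int)), Dom_get_price_for_weight final_weight price_slab → Pre_get_price_for_weight final_weight price_slab → Spec_get_price_for_weight final_weight price_slab (get_price_for_weight final_weight price_slab)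

-- ===== LEMMAS AND PROOFS =====

-- the break-loop IS List.find?
theorem pvFindLoop_eq_find? (fw : Int) (l : List Int) :
    pvFindLoop fw l = l.find? (fun w => decide (fw ≤ w)) := by
  induction l with
  | nil => rfl
  | cons a t ih => by_cases h : fw ≤ a <;> simp [pvFindLoop, List.find?, h, ih]

-- on a ≤-sorted list, the first element satisfying p is ≤ every member satisfying p
theorem find?_sorted_le {l : List Int} (hs : l.Pairwise (· ≤ ·)) {p : Int → Bool} {m x : Int}
    (hf : l.find? p = some m) (hx : x ∈ l) (hpx : p x = true) : m ≤ x := by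
  induction l with
  | nil => simp at hf
  | cons a t ih =>
    rw [List.pairwise_cons] at hs
    by_cases ha : p a = true
    · rw [List.find?_cons_of_pos ha] at hf
      cases hf
      rcases List.mem_cons.mp hx with rfl | hx'
      · exact le_refl _
      · exact hs.1 _ hx'
    · rw [List.find?_cons_of_neg (by simpa using ha)] at hf
      rcases List.mem_cons.mp hx with rfl | hx'
      · exact absurd hpx ha
      · exact ih hs.2 hf hx'

-- the two key choices agree
theorem key_eq (fw : Int) (keys : List Int) :
    (match pvFindLoop fw (PySem.List.sorted keys (fun x => x) false) with
      | some w => w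
      | none => (PySem.List.max? keys (fun x => x)).getD 0) =
    (if keys.filter (fun w => fw ≤ w) ≠ [] then
        (PySem.List.min? (keys.filter (fun w => fw ≤ w)) (fun x => x)).getD 0
      else (PySem.List.max? keys (fun x => x)).getD 0) := by
  rw [pvFindLoop_eq_find?]
  by_cases hc : keys.filter (fun w => decide (fw ≤ w)) = []
  · -- no candidate: find? on the permutation is none too
    have hnone : (PySem.List.sorted keys (fun x => x) false).find? (fun w => decide (fw ≤ w)) = none := by
      rw [List.find?_eq_none]
      intro x hx hpx
      have hxk : x ∈ keys := (PySem.List.mem_sorted _ _ _ _).mp hx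
      have : x ∈ keys.filter (fun w => decide (fw ≤ w)) := List.mem_filter.mpr ⟨hxk, hpx⟩
      simp [hc] at this
    rw [hnone, if_neg (by simp [hc])]
  · -- candidates exist: find? = some m, min? = some m', m = m'
    obtain ⟨x, hx⟩ := List.exists_mem_of_ne_nil _ hc
    have hxk : x ∈ keys := (List.mem_filter.mp hx).1
    have hpx : decide (fw ≤ x) = true := (List.mem_filter.mp hx).2
    have hxs : x ∈ PySem.List.sorted keys (fun x => x) false := (PySem.List.mem_sorted _ _ _ _).mpr hxk
    obtain ⟨m, hm⟩ : ∃ m, (PySem.List.sorted keys (fun x => x) false).find? (fun w => decide (fw ≤ w)) = some m := by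
      cases h : (PySem.List.sorted keys (fun x => x) false).find? (fun w => decide (fw ≤ w)) with
      | none => rw [List.find?_eq_none] at h; exact absurd hpx (h x hxs)
      | some m => exact ⟨m, rfl⟩
    obtain ⟨m', hm'⟩ : ∃ m', PySem.List.min? (keys.filter (fun w => decide (fw ≤ w))) (fun x => x) = some m' := by
      cases h : PySem.List.min? (keys.filter (fun w => decide (fw ≤ w))) (fun x => x) with
      | none => exact absurd ((PySem.List.min?_eq_none_iff _ _).mp h) hc
      | some m' => exact ⟨m', rfl⟩
    have hspw : (PySem.List.sorted keys (fun x => x) false).Pairwise (· ≤ ·) :=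
      PySem.List.sorted_pairwise keys (fun x => x)
    have hmem : m ∈ PySem.List.sorted keys (fun x => x) false := List.mem_of_find?_eq_some hm
    have hpm : decide (fw ≤ m) = true := by have := List.find?_some hm; simpa using this
    have hmf : m ∈ keys.filter (fun w => decide (fw ≤ w)) :=
      List.mem_filter.mpr ⟨(PySem.List.mem_sorted _ _ _ _).mp hmem, hpm⟩
    have hm'mem : m' ∈ keys.filter (fun w => decide (fw ≤ w)) := PySem.List.min?_mem hm'
    have h1 : m ≤ m' := by
      have hpm' : decide (fw ≤ m') = true := (List.mem_filter.mp hm'mem).2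
      have hms : m' ∈ PySem.List.sorted keys (fun x => x) false :=
        (PySem.List.mem_sorted _ _ _ _).mpr (List.mem_filter.mp hm'mem).1
      exact find?_sorted_le hspw hm hms hpm'
    have h2 : m' ≤ m := PySem.List.min?_isMin hm' m hmf
    rw [hm, if_pos hc, hm']
    exact le_antisymm h1 h2

-- ===== VERDICT (by name: the statement is the Claim_ definition above) =====
theorem get_price_for_weight_spec : Claim_equal_get_price_for_weight := by
  intro fw ps _ _
  unfold Spec_get_price_for_weight get_price_for_weight get_price_for_weight_alt
  simp only
  rw [key_eq]
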